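-- pv_equiv track=rewrite | github.com/CS474-Term-Project-Team5/app | utils/utils.py | bfs
-- ===== SOURCE A (Python) =====
-- def bfs(sub_cluster: list, start: int, data: list) -> list:
--     if (len(sub_cluster) == start):
--         return sub_cluster
--
--     next_start = len(sub_cluster)
--     for i in range(start, len(sub_cluster)):
--         for (r, c) in data:
--             if sub_cluster[i] == r:
--                 if c not in sub_cluster:
--                     sub_cluster.append(c)
--             elif sub_cluster[i] == c:
--                 if r not in sub_cluster:
--                     sub_cluster.append(r)
--     return bfs(sub_cluster, next_start, data)
-- ===== SOURCE B (Python) =====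
-- def bfs(sub_cluster: list, start: int, data: list) -> list:
--     # Linear BFS: adjacency lists built once from data, membership via a set,
--     # and the growing sub_cluster itself serves as the FIFO queue (cursor i).
--     adj = {}
--     for r, c in data:
--         adj.setdefault(r, []).append(c)
--         adj.setdefault(c, []).append(r)
--     visited = set(sub_cluster)
--     i = start
--     while i < len(sub_cluster):
--         for y in adj.get(sub_cluster[i], ()):
--             if y not in visited:
--                 visited.add(y)
--                 sub_cluster.append(y)
--         i += 1
--     return sub_cluster
-- ===== Notes on version B (the rewrite author's own statement) =====
-- stated objective: faster
-- what changed: A rescans the whole edge list for every frontier element in repeated recursive rounds with linear 'in list' membership tests; B builds an adjacency dict once, keeps a visited set, and runs a single-pass FIFO BFS using the growing list itself as the queue.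
-- outside the precondition, e.g. on bfs([7, 4], -3, []): A returns [7, 4], B raises IndexError; on bfs([1], -1, [(1, 2), (2, 3), (1, 4)]): A returns [1, 2, 3, 4], B returns [1, 2, 4, 3]
import Mathlib
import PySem

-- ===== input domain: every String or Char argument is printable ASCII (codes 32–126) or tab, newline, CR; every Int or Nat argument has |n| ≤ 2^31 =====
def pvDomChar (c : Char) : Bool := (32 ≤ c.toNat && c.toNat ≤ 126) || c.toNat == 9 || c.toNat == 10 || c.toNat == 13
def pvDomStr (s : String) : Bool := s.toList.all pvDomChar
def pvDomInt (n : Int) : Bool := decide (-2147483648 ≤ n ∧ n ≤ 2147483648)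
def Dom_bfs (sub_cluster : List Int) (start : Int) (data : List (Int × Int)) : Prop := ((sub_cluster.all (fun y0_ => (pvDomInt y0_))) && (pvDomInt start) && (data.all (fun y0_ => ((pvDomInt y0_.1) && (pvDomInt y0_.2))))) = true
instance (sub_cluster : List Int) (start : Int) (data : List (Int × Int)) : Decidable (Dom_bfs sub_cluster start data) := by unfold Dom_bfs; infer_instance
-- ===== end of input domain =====

-- B replaces A's repeated quadratic round-scans (each round rescans every edge against
-- every frontier node and does linear `in list` membership tests) by a single-pass BFS:
-- adjacency lists built once from data, set-based membership, the growing list itself as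
-- the FIFO queue.  A and B both mutate sub_cluster in place in Python (same appends, in
-- the same order, on Pre_); the equivalence proved here is about the returned list.

-- ===== PORT A =====
-- one `for (r, c) in data` iteration of A's inner loop at index i
def pvStepEdge (i : Int) (acc : List Int) (rc : Int × Int) : List Int :=
  match PySem.List.pyGet? acc i with
  | none => acc  -- Python raises IndexError here; such inputs are outside Pre_bfs
  | some x =>
    if x = rc.1 then (if rc.2 ∈ acc then acc else acc ++ [rc.2])
    else if x = rc.2 then (if rc.1 ∈ acc then acc else acc ++ [rc.1])
    else acc

-- the whole inner `for (r, c) in data` loop at index i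
def pvProcIdx (data : List (Int × Int)) (acc : List Int) (i : Int) : List Int :=
  data.foldl (pvStepEdge i) acc

-- A's recursion, fuelled to make it total (the fuel used in `bfs` provably suffices on
-- Pre_bfs: every recursive call except the last two appends a fresh endpoint of data)
def bfsAux : Nat → List Int → Int → List (Int × Int) → List Int
  | 0, sc, _, _ => sc
  | fuel+1, sc, start, data =>
    if (sc.length : Int) = start then sc
    else
      bfsAux fuel ((PySem.List.pyRange start (sc.length : Int) 1).foldl (pvProcIdx data) sc)
        (sc.length : Int) data

def bfs (sub_cluster : List Int) (start : Int) (data : List (Int × Int)) : List Int :=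
  bfsAux (2 * data.length + 2) sub_cluster start data

-- ===== PORT B =====
-- adj = {}; for r, c in data: adj.setdefault(r, []).append(c); adj.setdefault(c, []).append(r)
def pvBuildAdj (data : List (Int × Int)) : PySem.Dict Int (List Int) :=
  data.foldl
    (fun d rc => (d.modify rc.1 [] (· ++ [rc.2])).modify rc.2 [] (· ++ [rc.1]))
    PySem.Dict.empty

-- the `while i < len(sub_cluster)` loop, fuelled (the fuel used in `bfs_alt` provably
-- suffices on Pre_bfs: the loop runs once per final element from position start on)
def bfsAltLoop : Nat → PySem.Dict Int (List Int) → PySem.Set Int → List Int → Int → List Int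
  | 0, _, _, sc, _ => sc
  | fuel+1, adj, vis, sc, i =>
    if i < (sc.length : Int) then
      match PySem.List.pyGet? sc i with
      | none => sc  -- Python raises IndexError here; such inputs are outside Pre_bfs
      | some x =>
        let p := (adj.getD x []).foldl
          (fun (p : PySem.Set Int × List Int) y =>
            if y ∈ p.1 then p else (PySem.Set.add p.1 y, p.2 ++ [y])) (vis, sc)
        bfsAltLoop fuel adj p.1 p.2 (i + 1)
    else sc

def bfs_alt (sub_cluster : List Int) (start : Int) (data : List (Int × Int)) : List Int :=
  bfsAltLoop (sub_cluster.length + 2 * data.length + 2) (pvBuildAdj data)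
    (PySem.Set.ofList sub_cluster) sub_cluster start

-- ===== PRECONDITION & SPEC =====
-- Pre_ excludes negative start: there A resolves sub_cluster[i] for negative i against the
-- GROWING list (a wraparound artefact of the mutation, raising IndexError once i < -len),
-- while B reads start as a plain queue cursor; on start ≥ 0 — every call the module makes,
-- and every recursive self-call — the two agree exactly.
def Pre_bfs (sub_cluster : List Int) (start : Int) (data : List (Int × Int)) : Prop :=
  0 ≤ start
instance (sub_cluster : List Int) (start : Int) (data : List (Int × Int)) : Decidable (Pre_bfs sub_cluster start data) := by unfold Pre_bfs; infer_instance

def pvWitness_bfs : List Int × Int × (List (Int × Int)) := ([1, 2], 0, [(2, 3), (1, 4), (4, 5)])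

def Spec_bfs (sub_cluster : List Int) (start : Int) (data : List (Int × Int)) (out : List Int) : Prop := out = bfs_alt sub_cluster start data
instance (sub_cluster : List Int) (start : Int) (data : List (Int × Int)) (out : List Int) : Decidable (Spec_bfs sub_cluster start data out) := by unfold Spec_bfs; infer_instance

-- ===== CLAIM (what is proved, stated in full; the proofs are below) =====
def Claim_equal_bfs : Prop := ∀ (sub_cluster : List Int) (start : Int) (data : List (Int × Int)), Dom_bfs sub_cluster start data → Pre_bfs sub_cluster start data → Spec_bfs sub_cluster start data (bfs sub_cluster start data)

-- ===== LEMMAS AND PROOFS =====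

-- endpoints of the edge list, as a finset
def pvEnds (data : List (Int × Int)) : Finset Int :=
  (data.flatMap (fun rc => [rc.1, rc.2])).toFinset

-- number of endpoints of data still missing from sc
def pvMiss (sc : List Int) (data : List (Int × Int)) : Nat :=
  (pvEnds data \ sc.toFinset).card

-- one edge step either leaves acc alone or appends one fresh endpoint of that edge
theorem pvStepEdge_cases (i : Int) (acc : List Int) (rc : Int × Int) :
    pvStepEdge i acc rc = acc ∨
      ∃ y, y ∉ acc ∧ (y = rc.1 ∨ y = rc.2) ∧ pvStepEdge i acc rc = acc ++ [y] := by
  unfold pvStepEdge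
  cases h : PySem.List.pyGet? acc i with
  | none => exact Or.inl rfl
  | some x =>
    simp only []
    by_cases h1 : x = rc.1
    · by_cases h2 : rc.2 ∈ acc
      · left; rw [if_pos h1, if_pos h2]
      · exact Or.inr ⟨rc.2, h2, Or.inr rfl, by rw [if_pos h1, if_neg h2]⟩
    · by_cases h2 : x = rc.2
      · by_cases h3 : rc.1 ∈ acc
        · left; rw [if_neg h1, if_pos h2, if_pos h3]
        · exact Or.inr ⟨rc.1, h3, Or.inl rfl, by rw [if_neg h1, if_pos h2, if_neg h3]⟩
      · left; rw [if_neg h1, if_neg h2]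

-- appending a fresh endpoint keeps length + missing-count constant
theorem pvSum_append (data : List (Int × Int)) (acc : List Int) (y : Int)
    (hy : y ∈ pvEnds data) (hny : y ∉ acc) :
    ((acc ++ [y]).length : Int) + pvMiss (acc ++ [y]) data
      = (acc.length : Int) + pvMiss acc data := by
  unfold pvMiss
  rw [List.toFinset_append]
  have h1 : pvEnds data \ (acc.toFinset ∪ [y].toFinset) = (pvEnds data \ acc.toFinset).erase y := by
    simp only [List.toFinset_cons, List.toFinset_nil, insert_empty_eq]
    rw [Finset.union_comm, ← Finset.insert_eq, Finset.sdiff_insert]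
  rw [h1]
  have hmem : y ∈ pvEnds data \ acc.toFinset :=
    Finset.mem_sdiff.2 ⟨hy, by simpa using hny⟩
  rw [Finset.card_erase_of_mem hmem]
  have hpos : 0 < (pvEnds data \ acc.toFinset).card := Finset.card_pos.2 ⟨y, hmem⟩
  simp only [List.length_append, List.length_cons, List.length_nil]
  push_cast
  omega

theorem pvSum_foldl (data ds : List (Int × Int)) (i : Int) (acc : List Int)
    (hds : ∀ rc ∈ ds, rc ∈ data) :
    ((ds.foldl (pvStepEdge i) acc).length : Int) + pvMiss (ds.foldl (pvStepEdge i) acc) data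
      = (acc.length : Int) + pvMiss acc data := by
  induction ds generalizing acc with
  | nil => rfl
  | cons rc ds ih =>
    rw [List.foldl_cons]
    rw [ih (pvStepEdge i acc rc) (fun rc' h => hds rc' (List.mem_cons_of_mem rc h))]
    rcases pvStepEdge_cases i acc rc with h | ⟨y, hny, hy, h⟩
    · rw [h]
    · rw [h]
      apply pvSum_append data acc y _ hny
      unfold pvEnds
      rw [List.mem_toFinset, List.mem_flatMap]
      exact ⟨rc, hds rc List.mem_cons_self, by rcases hy with h' | h' <;> simp [h']⟩

theorem pvSum_procIdx (data : List (Int × Int)) (acc : List Int) (i : Int) :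
    ((pvProcIdx data acc i).length : Int) + pvMiss (pvProcIdx data acc i) data
      = (acc.length : Int) + pvMiss acc data :=
  pvSum_foldl data data i acc (fun _ h => h)

-- the canonical sequential process both ports compute
def pvSeq (data : List (Int × Int)) (sc : List Int) (i : Int) : List Int :=
  if h : i < (sc.length : Int) then pvSeq data (pvProcIdx data sc i) (i + 1) else sc
termination_by (((sc.length : Int) + pvMiss sc data) - i).toNat
decreasing_by
  have hp := pvSum_procIdx data sc i
  omega

theorem pvSeq_stop (data : List (Int × Int)) (sc : List Int) (i : Int)
    (h : ¬ i < (sc.length : Int)) : pvSeq data sc i = sc := by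
  rw [pvSeq]; simp [h]

theorem pvSeq_step (data : List (Int × Int)) (sc : List Int) (i : Int)
    (h : i < (sc.length : Int)) : pvSeq data sc i = pvSeq data (pvProcIdx data sc i) (i + 1) := by
  rw [pvSeq]; simp [h]

-- the inner-loop fold only appends, and everything appended is a fresh endpoint
theorem pvStep_prefix (i : Int) (ds : List (Int × Int)) (acc : List Int) :
    ∃ t, ds.foldl (pvStepEdge i) acc = acc ++ t ∧
      ∀ y ∈ t, y ∉ acc ∧ ∃ rc ∈ ds, y = rc.1 ∨ y = rc.2 := by
  induction ds generalizing acc with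
  | nil => exact ⟨[], by simp⟩
  | cons rc ds ih =>
    rw [List.foldl_cons]
    rcases pvStepEdge_cases i acc rc with h | ⟨y, hny, hy, h⟩
    · obtain ⟨t, ht, hp⟩ := ih acc
      refine ⟨t, by rw [h]; exact ht, fun z hz => ⟨(hp z hz).1, ?_⟩⟩
      obtain ⟨rc', h1, h2⟩ := (hp z hz).2
      exact ⟨rc', List.mem_cons_of_mem rc h1, h2⟩
    · obtain ⟨t, ht, hp⟩ := ih (acc ++ [y])
      refine ⟨[y] ++ t, by rw [h, ht, List.append_assoc], fun z hz => ?_⟩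
      rcases List.mem_append.1 hz with hz1 | hz2
      · have : z = y := by simpa using hz1
        subst this
        exact ⟨hny, rc, List.mem_cons_self, hy⟩
      · refine ⟨fun hc => (hp z hz2).1 (List.mem_append_left _ hc), ?_⟩
        obtain ⟨rc', h1, h2⟩ := (hp z hz2).2
        exact ⟨rc', List.mem_cons_of_mem rc h1, h2⟩

theorem pvRound_prefix (data : List (Int × Int)) (idxs : List Int) (sc : List Int) :
    ∃ t, idxs.foldl (pvProcIdx data) sc = sc ++ t ∧
      ∀ y ∈ t, y ∉ sc ∧ y ∈ pvEnds data := by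
  induction idxs generalizing sc with
  | nil => exact ⟨[], by simp⟩
  | cons j idxs ih =>
    rw [List.foldl_cons]
    obtain ⟨t1, ht1, hp1⟩ := pvStep_prefix j data sc
    obtain ⟨t2, ht2, hp2⟩ := ih (pvProcIdx data sc j)
    refine ⟨t1 ++ t2, by rw [ht2]; unfold pvProcIdx; rw [ht1, List.append_assoc], fun z hz => ?_⟩
    rcases List.mem_append.1 hz with hz1 | hz2
    · refine ⟨(hp1 z hz1).1, ?_⟩
      obtain ⟨rc, h1, h2⟩ := (hp1 z hz1).2
      unfold pvEnds
      rw [List.mem_toFinset, List.mem_flatMap]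
      exact ⟨rc, h1, by rcases h2 with h' | h' <;> simp [h']⟩
    · have h2 := hp2 z hz2
      unfold pvProcIdx at h2
      rw [ht1] at h2
      exact ⟨fun hc => h2.1 (List.mem_append_left _ hc), h2.2⟩

theorem pvMiss_lt (data : List (Int × Int)) (sc t : List Int) (hne : t ≠ [])
    (ht : ∀ y ∈ t, y ∉ sc ∧ y ∈ pvEnds data) :
    pvMiss (sc ++ t) data < pvMiss sc data := by
  obtain ⟨y, hy⟩ := List.exists_mem_of_ne_nil t hne
  unfold pvMiss
  apply Finset.card_lt_card
  rw [Finset.ssubset_iff_of_subset]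
  · exact ⟨y, Finset.mem_sdiff.2 ⟨(ht y hy).2, by simpa using (ht y hy).1⟩,
      fun hc => (Finset.mem_sdiff.1 hc).2 (by simp [hy])⟩
  · intro z hz
    rw [Finset.mem_sdiff] at hz ⊢
    refine ⟨hz.1, fun hc => hz.2 ?_⟩
    rw [List.toFinset_append]
    exact Finset.mem_union_left _ hc

-- processing a block of in-range indices one by one
theorem pvSeq_chunk (data : List (Int × Int)) (n : Nat) :
    ∀ (i : Int) (sc : List Int), 0 ≤ i → i + n ≤ (sc.length : Int) →
      pvSeq data sc i
        = pvSeq data ((PySem.List.pyRange i (i + n) 1).foldl (pvProcIdx data) sc) (i + n) := by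
  induction n with
  | zero =>
    intro i sc h0 hle
    rw [PySem.List.pyRange_one_eq_nil (by omega)]
    simp
  | succ n ih =>
    intro i sc h0 hle
    push_cast at hle ⊢
    rw [PySem.List.pyRange_one_cons (by omega), List.foldl_cons]
    rw [pvSeq_step data sc i (by omega)]
    obtain ⟨t, ht, _⟩ := pvStep_prefix i data sc
    have hlen : (sc.length : Int) ≤ ((pvProcIdx data sc i).length : Int) := by
      unfold pvProcIdx; rw [ht]; simp
    have he : i + ((n : Int) + 1) = (i + 1) + (n : Int) := by ring
    rw [he]
    exact ih (i + 1) (pvProcIdx data sc i) (by omega) (by omega)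

theorem bfsAux_self (data : List (Int × Int)) (m : Nat) (sc : List Int) :
    bfsAux m sc (sc.length : Int) data = sc := by
  cases m <;> simp [bfsAux]

-- A computes pvSeq
theorem pvA_eq_seq (data : List (Int × Int)) :
    ∀ (fuel : Nat) (sc : List Int) (start : Int), pvMiss sc data < fuel → 0 ≤ start →
      bfsAux fuel sc start data = pvSeq data sc start := by
  intro fuel
  induction fuel with
  | zero => intro sc start h _; omega
  | succ fuel ih =>
    intro sc start hfuel h0
    simp only [bfsAux]
    by_cases he : (sc.length : Int) = start
    · rw [if_pos he, pvSeq_stop data sc start (by omega)]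
    · rw [if_neg he]
      by_cases hlt : start < (sc.length : Int)
      · have hchunk := pvSeq_chunk data ((sc.length : Int) - start).toNat start sc h0 (by omega)
        have hn : start + ((((sc.length : Int) - start).toNat : Nat) : Int) = (sc.length : Int) := by
          omega
        rw [hn] at hchunk
        by_cases hsc : (PySem.List.pyRange start (sc.length : Int) 1).foldl (pvProcIdx data) sc = sc
        · rw [hsc, bfsAux_self, hchunk, hsc, pvSeq_stop data sc (sc.length : Int) (by omega)]
        · obtain ⟨t, ht, hp⟩ := pvRound_prefix data (PySem.List.pyRange start (sc.length : Int) 1) sc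
          have hne : t ≠ [] := by
            intro hnil; apply hsc; rw [ht, hnil, List.append_nil]
          have hlt2 : pvMiss ((PySem.List.pyRange start (sc.length : Int) 1).foldl (pvProcIdx data) sc) data
              < pvMiss sc data := by
            rw [ht]; exact pvMiss_lt data sc t hne hp
          rw [ih _ (sc.length : Int) (by omega) (by omega)]
          exact hchunk.symm
      · rw [PySem.List.pyRange_one_eq_nil (by omega), List.foldl_nil, bfsAux_self,
          pvSeq_stop data sc start (by omega)]

-- B-side: per-edge candidate list
def pvCands (x : Int) (rc : Int × Int) : List Int :=
  (if x = rc.1 then [rc.2] else []) ++ (if x = rc.2 then [rc.1] else [])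

theorem pvAdj_getD_gen (x : Int) :
    ∀ (ds : List (Int × Int)) (d : PySem.Dict Int (List Int)),
      ((ds.foldl (fun d rc => (d.modify rc.1 [] (· ++ [rc.2])).modify rc.2 [] (· ++ [rc.1])) d).getD x [])
        = d.getD x [] ++ ds.flatMap (pvCands x) := by
  intro ds
  induction ds with
  | nil => intro d; simp
  | cons rc ds ih =>
    intro d
    rw [List.foldl_cons, ih]
    simp only [PySem.Dict.getD_modify]
    unfold pvCands
    split_ifs <;> simp_all [List.flatMap_cons, List.append_assoc]

theorem pvAdj_getD (data : List (Int × Int)) (x : Int) :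
    (pvBuildAdj data).getD x [] = data.flatMap (pvCands x) := by
  unfold pvBuildAdj
  simpa using pvAdj_getD_gen x data PySem.Dict.empty

theorem pvGet_append (xs t : List Int) (i : Int) (x : Int) (hi : 0 ≤ i)
    (h : PySem.List.pyGet? xs i = some x) : PySem.List.pyGet? (xs ++ t) i = some x := by
  rw [PySem.List.pyGet?_of_nonneg _ hi] at h
  rw [PySem.List.pyGet?_of_nonneg _ hi]
  rw [List.getElem?_append_left (List.getElem?_eq_some_iff.1 h).1]
  exact h

-- one edge's candidates, folded by B's visited filter, are exactly A's edge step
theorem pvEdgeFold (i x : Int) (rc : Int × Int) (vis : PySem.Set Int) (acc : List Int)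
    (hx : x ∈ acc) (hinv : ∀ y, y ∈ vis ↔ y ∈ acc)
    (hget : PySem.List.pyGet? acc i = some x) :
    ((pvCands x rc).foldl (fun (p : PySem.Set Int × List Int) y =>
        if y ∈ p.1 then p else (PySem.Set.add p.1 y, p.2 ++ [y])) (vis, acc)).2
      = pvStepEdge i acc rc ∧
    (∀ z, z ∈ ((pvCands x rc).foldl (fun (p : PySem.Set Int × List Int) y =>
        if y ∈ p.1 then p else (PySem.Set.add p.1 y, p.2 ++ [y])) (vis, acc)).1 ↔
      z ∈ ((pvCands x rc).foldl (fun (p : PySem.Set Int × List Int) y =>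
        if y ∈ p.1 then p else (PySem.Set.add p.1 y, p.2 ++ [y])) (vis, acc)).2) := by
  by_cases h1 : x = rc.1 <;> by_cases h2 : x = rc.2
  · have hm : rc.2 ∈ acc := h2 ▸ hx
    have hv : rc.2 ∈ vis := (hinv _).2 hm
    have hm1 : rc.1 ∈ acc := h1 ▸ hx
    have hv1 : rc.1 ∈ vis := (hinv _).2 hm1
    have hvx : x ∈ vis := (hinv x).2 hx
    refine ⟨by simp [pvCands, pvStepEdge, hget, ← h1, ← h2, hvx, hx], fun z => ?_⟩
    simpa [pvCands, ← h1, ← h2, hvx] using hinv z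
  · by_cases hm : rc.2 ∈ acc
    · have hv : rc.2 ∈ vis := (hinv _).2 hm
      refine ⟨by simp [pvCands, pvStepEdge, hget, ← h1, h2, hv, hm], fun z => ?_⟩
      simpa [pvCands, ← h1, h2, hv] using hinv z
    · have hv : rc.2 ∉ vis := fun h => hm ((hinv _).1 h)
      refine ⟨by simp [pvCands, pvStepEdge, hget, ← h1, h2, hv, hm], fun z => ?_⟩
      have hz := hinv z
      simp [pvCands, ← h1, h2, hv, hz]
  · by_cases hm : rc.1 ∈ acc
    · have hv : rc.1 ∈ vis := (hinv _).2 hm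
      refine ⟨by simp [pvCands, pvStepEdge, hget, h1, ← h2, hv, hm], fun z => ?_⟩
      simpa [pvCands, h1, ← h2, hv] using hinv z
    · have hv : rc.1 ∉ vis := fun h => hm ((hinv _).1 h)
      refine ⟨by simp [pvCands, pvStepEdge, hget, h1, ← h2, hv, hm], fun z => ?_⟩
      have hz := hinv z
      simp [pvCands, h1, ← h2, hv, hz]
  · refine ⟨by simp [pvCands, pvStepEdge, hget, h1, h2], fun z => ?_⟩
    simpa [pvCands, h1, h2] using hinv z

-- the node fold of B equals the data fold of A and preserves the visited invariant
theorem pvNodeFold (data : List (Int × Int)) (i x : Int) (hi : 0 ≤ i) :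
    ∀ (ds : List (Int × Int)) (vis : PySem.Set Int) (acc : List Int),
      x ∈ acc → (∀ y, y ∈ vis ↔ y ∈ acc) → PySem.List.pyGet? acc i = some x →
      ((ds.flatMap (pvCands x)).foldl
          (fun (p : PySem.Set Int × List Int) y =>
            if y ∈ p.1 then p else (PySem.Set.add p.1 y, p.2 ++ [y])) (vis, acc)).2
        = ds.foldl (pvStepEdge i) acc ∧
      (∀ y, y ∈ ((ds.flatMap (pvCands x)).foldl
          (fun (p : PySem.Set Int × List Int) y =>
            if y ∈ p.1 then p else (PySem.Set.add p.1 y, p.2 ++ [y])) (vis, acc)).1 ↔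
        y ∈ ((ds.flatMap (pvCands x)).foldl
          (fun (p : PySem.Set Int × List Int) y =>
            if y ∈ p.1 then p else (PySem.Set.add p.1 y, p.2 ++ [y])) (vis, acc)).2) := by
  intro ds
  induction ds with
  | nil => intro vis acc _ hinv _; exact ⟨rfl, hinv⟩
  | cons rc ds ih =>
    intro vis acc hx hinv hget
    simp only [List.flatMap_cons, List.foldl_append, List.foldl_cons]
    obtain ⟨hq2, hqinv⟩ := pvEdgeFold i x rc vis acc hx hinv hget
    set q := (pvCands x rc).foldl (fun (p : PySem.Set Int × List Int) y =>
        if y ∈ p.1 then p else (PySem.Set.add p.1 y, p.2 ++ [y])) (vis, acc) with hqdef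
    have hx' : x ∈ q.2 := by
      rw [hq2]
      rcases pvStepEdge_cases i acc rc with hse | ⟨y, _, _, hse⟩ <;> rw [hse]
      · exact hx
      · exact List.mem_append_left _ hx
    have hget' : PySem.List.pyGet? q.2 i = some x := by
      rw [hq2]
      rcases pvStepEdge_cases i acc rc with hse | ⟨y, _, _, hse⟩ <;> rw [hse]
      · exact hget
      · exact pvGet_append acc [y] i x hi hget
    have h := ih q.1 q.2 hx' hqinv hget'
    rw [Prod.mk.eta] at h
    rw [← hq2]
    exact h

-- B computes pvSeq
theorem pvB_eq_seq (data : List (Int × Int)) :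
    ∀ (fuel : Nat) (sc : List Int) (i : Int) (vis : PySem.Set Int), 0 ≤ i →
      (∀ y, y ∈ vis ↔ y ∈ sc) →
      ((sc.length : Int) + pvMiss sc data) - i < fuel →
      bfsAltLoop fuel (pvBuildAdj data) vis sc i = pvSeq data sc i := by
  intro fuel
  induction fuel with
  | zero =>
    intro sc i vis _ _ hf
    rw [pvSeq_stop data sc i (by omega)]
    rfl
  | succ fuel ih =>
    intro sc i vis hi hinv hf
    by_cases h : i < (sc.length : Int)
    · obtain ⟨x, hget⟩ : ∃ x, PySem.List.pyGet? sc i = some x :=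
        ⟨_, PySem.List.pyGet?_eq_some_getElem sc hi h⟩
      have hx : x ∈ sc := PySem.List.mem_of_pyGet?_eq_some _ hget
      simp only [bfsAltLoop, if_pos h, hget]
      rw [pvAdj_getD data x]
      obtain ⟨hp2, hpinv⟩ := pvNodeFold data i x hi data vis sc hx hinv hget
      have hfuel' : ((((data.flatMap (pvCands x)).foldl
          (fun (p : PySem.Set Int × List Int) y =>
            if y ∈ p.1 then p else (PySem.Set.add p.1 y, p.2 ++ [y])) (vis, sc)).2.length : Int)
          + pvMiss ((data.flatMap (pvCands x)).foldl
          (fun (p : PySem.Set Int × List Int) y =>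
            if y ∈ p.1 then p else (PySem.Set.add p.1 y, p.2 ++ [y])) (vis, sc)).2 data)
          - (i + 1) < fuel := by
        rw [hp2]
        have hsum := pvSum_procIdx data sc i
        unfold pvProcIdx at hsum
        omega
      rw [ih _ (i + 1) _ (by omega) hpinv hfuel']
      rw [pvSeq_step data sc i h, hp2]
      rfl
    · rw [pvSeq_stop data sc i h]
      simp [bfsAltLoop, h]

theorem pvMiss_le (sc : List Int) (data : List (Int × Int)) :
    pvMiss sc data ≤ 2 * data.length := by
  have hlen : (data.flatMap (fun rc => [rc.1, rc.2])).length = 2 * data.length := by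
    induction data with
    | nil => rfl
    | cons rc ds ih => simp only [List.flatMap_cons, List.length_append, ih, List.length_cons,
        List.length_nil]; omega
  calc pvMiss sc data ≤ (pvEnds data).card := Finset.card_le_card Finset.sdiff_subset
    _ ≤ (data.flatMap (fun rc => [rc.1, rc.2])).length := List.toFinset_card_le _
    _ = 2 * data.length := hlen

-- ===== VERDICT (by name: the statement is the Claim_ definition above) =====
theorem bfs_spec : Claim_equal_bfs := by
  intro sc start data _hdom hpre
  unfold Spec_bfs bfs bfs_alt
  have hm := pvMiss_le sc data
  have hs : 0 ≤ start := hpre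
  rw [pvA_eq_seq data _ sc start (by omega) hpre]
  exact (pvB_eq_seq data _ sc start (PySem.Set.ofList sc) hpre
    (fun y => PySem.Set.mem_ofList sc y) (by omega)).symm
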